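-- pv_equiv track=rewrite | github.com/DanKolganov/BatsynAssignment1 | assignment_1.py | largest_first_cliques
-- ===== SOURCE A (Python) =====
-- def largest_first_cliques(graph : dict) -> list:
--     vertices = list(graph.keys())
--
--     cliques = []
--     clique = []
--     count_cliques = 0
--
--     while vertices:
--         vertices.sort(key=lambda x: len([v for v in graph[x] if v in vertices]), reverse=True)
--
--         clique = []
--         best_vertex = vertices[0]
--         candidates_per_clique = [x for x in graph[best_vertex] if x in vertices]
--         clique.append(best_vertex)
--
--         while candidates_per_clique:
--
--             best_vertex_per_clique = candidates_per_clique[0]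
--             clique.append(best_vertex_per_clique)
--             candidates_per_clique = [x for x in candidates_per_clique if x in graph[best_vertex_per_clique]]
--
--         cliques.append(clique)
--         count_cliques += 1
--         vertices = [item for item in vertices if item not in clique]
--
--     return cliques, count_cliques
-- ===== SOURCE B (Python) =====
-- def largest_first_cliques(graph : dict) -> list:
--     # A's degree sort is a no-op (CPython empties the list during list.sort, so the
--     # key's 'v in vertices' test always sees []), so vertices are simply processed
--     # in insertion order; each clique is grown in one forward pass over the first
--     # vertex's adjacency list instead of repeatedly rebuilding a candidate list.
--     vertices = list(graph.keys())
--     cliques = []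
--     while vertices:
--         best = vertices[0]
--         clique = [best]
--         for c in graph[best]:
--             if c in vertices and all(c in graph[m] for m in clique[1:]):
--                 clique.append(c)
--         cliques.append(clique)
--         vertices = [v for v in vertices if v not in clique]
--     return cliques, len(cliques)
-- ===== Notes on version B (the rewrite author's own statement) =====
-- stated objective: simpler
-- what changed: A's degree sort is a no-op (CPython empties the list during list.sort, so the key's 'v in vertices' test always sees []), so B drops the sort and the counter, takes the first remaining vertex, and grows each clique in a single forward pass over its adjacency list (membership test against the already-chosen members) instead of repeatedly rebuilding a shrinking candidate list.
-- outside the precondition, e.g. on largest_first_cliques({1: [2, 1], 2: []}): A returns ([[1, 2]], 1), B returns ([[1, 2]], 1)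
import Mathlib
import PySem

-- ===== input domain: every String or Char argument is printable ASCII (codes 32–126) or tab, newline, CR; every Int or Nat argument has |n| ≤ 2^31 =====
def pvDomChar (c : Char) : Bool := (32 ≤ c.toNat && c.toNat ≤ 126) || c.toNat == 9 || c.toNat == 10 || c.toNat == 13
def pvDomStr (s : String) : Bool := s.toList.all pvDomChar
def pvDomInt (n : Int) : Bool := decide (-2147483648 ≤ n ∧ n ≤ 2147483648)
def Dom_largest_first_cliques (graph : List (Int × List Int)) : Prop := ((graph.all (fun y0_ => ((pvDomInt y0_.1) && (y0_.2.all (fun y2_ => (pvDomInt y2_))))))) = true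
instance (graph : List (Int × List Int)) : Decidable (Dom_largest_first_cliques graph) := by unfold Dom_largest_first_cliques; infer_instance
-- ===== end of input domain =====

-- B drops A's dead degree sort (a CPython no-op: list.sort empties the list, so the key's
-- 'v in vertices' test always sees []) and grows each clique in one forward pass instead of
-- repeatedly rebuilding a candidate list; equal return value on all self-loop-free graphs.


-- ===== PORT A =====
-- A's inner while-loop: append the head candidate, then filter the candidate list by
-- membership in its adjacency list.  Fuel = candidate count (under Pre_ the head is
-- always dropped by its own filter, so the fuel is never exhausted where A terminates).
def pvInnerA (d : PySem.Dict Int (List Int)) : Nat → List Int → List Int → List Int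
  | _, clique, [] => clique
  | 0, clique, _ => clique
  | f + 1, clique, c :: cs =>
      pvInnerA d f (clique ++ [c]) ((c :: cs).filter (fun x => decide (x ∈ d.getD c [])))

-- A's outer while-loop; fuel = vertex count (each round removes at least the picked head).
-- The sort key is ported as Python computes it: CPython's list.sort makes the list appear
-- EMPTY while sorting, so the closure's 'v in vertices' test sees [] and every key is 0.
def pvOuterA (d : PySem.Dict Int (List Int)) :
    Nat → List Int → List (List Int) → Int → List (List Int) × Int
  | _, [], cliques, count => (cliques, count)
  | 0, _ :: _, cliques, count => (cliques, count)
  | f + 1, v :: vs, cliques, count =>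
      let vertices := PySem.List.sorted (v :: vs)
        (fun x => ((d.getD x []).filter (fun y => decide (y ∈ ([] : List Int)))).length) true
      let best := vertices.headD 0
      let candidates := (d.getD best []).filter (fun x => decide (x ∈ vertices))
      let clique := pvInnerA d candidates.length [best] candidates
      pvOuterA d f (vertices.filter (fun item => decide (item ∉ clique)))
        (cliques ++ [clique]) (count + 1)

def largest_first_cliques (graph : List (Int × List Int)) : List (List Int) × Int :=
  let d := PySem.Dict.ofList graph
  pvOuterA d d.keys.length d.keys [] 0

-- ===== PORT B =====
-- B's outer loop; fuel = vertex count.  The clique is grown by Source B's single forward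
-- for-loop over graph[best], ported as a foldl; the count is len(cliques) at the end.
def pvOuterB (d : PySem.Dict Int (List Int)) :
    Nat → List Int → List (List Int) → List (List Int) × Int
  | _, [], cliques => (cliques, (cliques.length : Int))
  | 0, _ :: _, cliques => (cliques, (cliques.length : Int))
  | f + 1, v :: vs, cliques =>
      let clique := (d.getD v []).foldl
        (fun cl c =>
          if decide (c ∈ v :: vs) && (cl.drop 1).all (fun m => decide (c ∈ d.getD m [])) then
            cl ++ [c]
          else cl) [v]
      pvOuterB d f ((v :: vs).filter (fun x => decide (x ∉ clique))) (cliques ++ [clique])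

def largest_first_cliques_alt (graph : List (Int × List Int)) : List (List Int) × Int :=
  let d := PySem.Dict.ofList graph
  pvOuterB d d.keys.length d.keys []

-- ===== PRECONDITION & SPEC =====
-- Pre_ excludes graphs in which some key lists itself as a neighbour: on such inputs A's
-- inner loop usually never terminates ({1: [1]} loops forever), and which self-loop graphs
-- happen to terminate depends on the unfolding, so all of them are excluded.
def Pre_largest_first_cliques (graph : List (Int × List Int)) : Prop :=
  ∀ k ∈ (PySem.Dict.ofList graph).keys, k ∉ (PySem.Dict.ofList graph).getD k []
instance (graph : List (Int × List Int)) : Decidable (Pre_largest_first_cliques graph) := by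
  unfold Pre_largest_first_cliques; infer_instance

def pvWitness_largest_first_cliques : (List (Int × List Int)) :=
  [(1, [2, 3]), (2, [1, 3]), (3, [1, 2]), (4, [])]

def Spec_largest_first_cliques (graph : List (Int × List Int)) (out : List (List Int) × Int) : Prop := out = largest_first_cliques_alt graph
instance (graph : List (Int × List Int)) (out : List (List Int) × Int) : Decidable (Spec_largest_first_cliques graph out) := by unfold Spec_largest_first_cliques; infer_instance

-- ===== CLAIM (what is proved, stated in full; the proofs are below) =====
def Claim_equal_largest_first_cliques : Prop := ∀ (graph : List (Int × List Int)), Dom_largest_first_cliques graph → Pre_largest_first_cliques graph → Spec_largest_first_cliques graph (largest_first_cliques graph)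

-- ===== LEMMAS AND PROOFS =====

-- The common "greedy selection" core both inner loops compute: walk the candidate list,
-- keep c iff c is adjacent to every member chosen so far.
def pvG (d : PySem.Dict Int (List Int)) : List Int → List Int → List Int
  | _, [] => []
  | ms, c :: cs =>
      if ms.all (fun m => decide (c ∈ d.getD m [])) then c :: pvG d (ms ++ [c]) cs
      else pvG d ms cs

-- skipping a filter pvG performs anyway
lemma pvG_filter (d : PySem.Dict Int (List Int)) (c : Int) :
    ∀ (cs ms : List Int), c ∈ ms →
      pvG d ms cs = pvG d ms (cs.filter (fun x => decide (x ∈ d.getD c []))) := by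
  intro cs
  induction cs with
  | nil => intro ms _; rfl
  | cons x cs ih =>
      intro ms hc
      by_cases hx : x ∈ d.getD c []
      · rw [List.filter_cons, if_pos (by simpa using hx), pvG, pvG]
        by_cases hall : (ms.all (fun m => decide (x ∈ d.getD m []))) = true
        · rw [if_pos hall, if_pos hall, ih (ms ++ [x]) (by simp [hc])]
        · rw [if_neg hall, if_neg hall, ih ms hc]
      · have hfalse : (ms.all (fun m => decide (x ∈ d.getD m []))) = false := by
          simp only [List.all_eq_false]
          exact ⟨c, hc, by simpa using hx⟩
        rw [List.filter_cons, if_neg (by simpa using hx), pvG, hfalse]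
        simp only [Bool.false_eq_true, if_false]
        exact ih ms hc

-- A's inner loop computes pvG
lemma innerA_eq_pvG (d : PySem.Dict Int (List Int)) :
    ∀ (f : Nat) (cs : List Int), cs.length ≤ f →
      (∀ c ∈ cs, c ∉ d.getD c []) →
      ∀ (ms : List Int), (∀ c ∈ cs, ∀ m ∈ ms, c ∈ d.getD m []) →
      ∀ (pre : List Int), pvInnerA d f pre cs = pre ++ pvG d ms cs := by
  intro f
  induction f with
  | zero =>
      intro cs hlen _ ms _ pre
      have : cs = [] := List.eq_nil_of_length_eq_zero (Nat.le_zero.mp hlen)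
      subst this
      simp [pvInnerA, pvG]
  | succ f ih =>
      intro cs hlen hself ms hms pre
      match cs with
      | [] => simp [pvInnerA, pvG]
      | c :: cs =>
        have hcself : c ∉ d.getD c [] := hself c (by simp)
        have hfilter : (c :: cs).filter (fun x => decide (x ∈ d.getD c [])) =
            cs.filter (fun x => decide (x ∈ d.getD c [])) := by
          simp [hcself]
        have hcheck : (ms.all (fun m => decide (c ∈ d.getD m []))) = true := by
          simp only [List.all_eq_true, decide_eq_true_eq]
          exact fun m hm => hms c (by simp) m hm
        have hstep := ih (cs.filter (fun x => decide (x ∈ d.getD c [])))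
          (le_trans (List.length_filter_le _ _) (by simpa using hlen))
          (fun x hx => hself x (by simp at hx; simp [hx.1]))
          (ms ++ [c])
          (by
            intro x hx m hm
            simp only [List.mem_filter, decide_eq_true_eq] at hx
            rcases List.mem_append.mp hm with hm | hm
            · exact hms x (by simp [hx.1]) m hm
            · simp only [List.mem_singleton] at hm; subst hm; exact hx.2)
          (pre ++ [c])
        calc pvInnerA d (f + 1) pre (c :: cs)
            = pvInnerA d f (pre ++ [c]) ((c :: cs).filter (fun x => decide (x ∈ d.getD c []))) := rfl
          _ = pvInnerA d f (pre ++ [c]) (cs.filter (fun x => decide (x ∈ d.getD c []))) := by rw [hfilter]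
          _ = (pre ++ [c]) ++ pvG d (ms ++ [c]) (cs.filter (fun x => decide (x ∈ d.getD c []))) := hstep
          _ = pre ++ (c :: pvG d (ms ++ [c]) cs) := by
              rw [← pvG_filter d c cs (ms ++ [c]) (by simp)]; simp
          _ = pre ++ pvG d ms (c :: cs) := by rw [pvG]; simp [hcheck]

-- B's fold computes pvG (on the candidates that pass the 'c in vertices' test)
lemma foldB_eq_pvG (d : PySem.Dict Int (List Int)) (vertices : List Int) (v : Int) :
    ∀ (cs ms : List Int),
      cs.foldl (fun cl c =>
          if decide (c ∈ vertices) && (cl.drop 1).all (fun m => decide (c ∈ d.getD m [])) then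
            cl ++ [c]
          else cl) (v :: ms)
        = v :: (ms ++ pvG d ms (cs.filter (fun x => decide (x ∈ vertices)))) := by
  intro cs
  induction cs with
  | nil => intro ms; simp [pvG]
  | cons c cs ih =>
      intro ms
      rw [List.foldl_cons]
      have hd : List.drop 1 (v :: ms) = ms := rfl
      rw [hd, List.cons_append]
      by_cases hv : c ∈ vertices
      · rw [List.filter_cons_of_pos (by simpa using hv), pvG]
        by_cases hall : (ms.all (fun m => decide (c ∈ d.getD m []))) = true
        · rw [if_pos hall,
            if_pos (show (decide (c ∈ vertices) &&
              ms.all (fun m => decide (c ∈ d.getD m []))) = true by simp [hv, hall]),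
            ih (ms ++ [c])]
          simp
        · rw [if_neg hall,
            if_neg (show ¬ (decide (c ∈ vertices) &&
              ms.all (fun m => decide (c ∈ d.getD m []))) = true by simp [hall]),
            ih ms]
      · rw [if_neg (show ¬ (decide (c ∈ vertices) &&
              ms.all (fun m => decide (c ∈ d.getD m []))) = true by simp [hv]),
          List.filter_cons_of_neg (by simpa using hv), ih ms]

-- the ported sort key is constantly 0, so the (stable) sort is the identity
lemma sorted_noop (d : PySem.Dict Int (List Int)) (l : List Int) :
    PySem.List.sorted l
      (fun x => ((d.getD x []).filter (fun y => decide (y ∈ ([] : List Int)))).length) true = l := by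
  apply PySem.List.sorted_rev_eq_self_of_pairwise
  have : ∀ (m : List Int), m.Pairwise
      (fun a b => ((d.getD b []).filter (fun y => decide (y ∈ ([] : List Int)))).length ≤
        ((d.getD a []).filter (fun y => decide (y ∈ ([] : List Int)))).length) := by
    intro m
    induction m with
    | nil => exact List.Pairwise.nil
    | cons x xs ih => exact List.Pairwise.cons (fun y _ => by simp) ih
  exact this l

-- the two outer loops agree, given no live vertex is its own neighbour
lemma outer_eq (d : PySem.Dict Int (List Int)) :
    ∀ (f : Nat) (vertices : List Int), (∀ v ∈ vertices, v ∉ d.getD v []) →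
      ∀ (cliques : List (List Int)),
        pvOuterA d f vertices cliques (cliques.length : Int) = pvOuterB d f vertices cliques := by
  intro f
  induction f with
  | zero =>
      intro vertices _ cliques
      match vertices with
      | [] => rfl
      | _ :: _ => rfl
  | succ f ih =>
      intro vertices hself cliques
      match vertices with
      | [] => rfl
      | v :: vs =>
        have hsort := sorted_noop d (v :: vs)
        have hcand : ∀ c ∈ (d.getD v []).filter (fun x => decide (x ∈ v :: vs)),
            c ∉ d.getD c [] := by
          intro c hc
          simp only [List.mem_filter, decide_eq_true_eq] at hc
          exact hself c hc.2
        have hA := innerA_eq_pvG d ((d.getD v []).filter (fun x => decide (x ∈ v :: vs))).length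
          ((d.getD v []).filter (fun x => decide (x ∈ v :: vs))) le_rfl hcand
          [] (by simp) [v]
        have hB := foldB_eq_pvG d (v :: vs) v (d.getD v []) []
        have hclique :
            pvInnerA d ((d.getD v []).filter (fun x => decide (x ∈ v :: vs))).length [v]
              ((d.getD v []).filter (fun x => decide (x ∈ v :: vs)))
            = (d.getD v []).foldl (fun cl c =>
                if decide (c ∈ v :: vs) && (cl.drop 1).all (fun m => decide (c ∈ d.getD m [])) then
                  cl ++ [c]
                else cl) [v] := by
          rw [hA, hB]; simp
        show pvOuterA d (f + 1) (v :: vs) cliques (cliques.length : Int) = _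
        rw [pvOuterA, pvOuterB]
        simp only [hsort, List.headD_cons]
        rw [hclique]
        have hcount : ((cliques ++ [((d.getD v []).foldl (fun cl c =>
            if decide (c ∈ v :: vs) && (cl.drop 1).all (fun m => decide (c ∈ d.getD m [])) then
              cl ++ [c] else cl) [v])]).length : Int) = (cliques.length : Int) + 1 := by
          simp
        rw [← hcount]
        exact ih _ (fun x hx => hself x (List.mem_of_mem_filter hx)) _

-- ===== VERDICT (by name: the statement is the Claim_ definition above) =====
theorem largest_first_cliques_spec : Claim_equal_largest_first_cliques := by
  intro graph _ hpre
  unfold Spec_largest_first_cliques largest_first_cliques largest_first_cliques_alt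
  exact outer_eq (PySem.Dict.ofList graph) _ _ hpre []
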